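-- pv_equiv track=rewrite | github.com/frppass/raw | py/lk21drama.py | _identify_player_type
-- ===== SOURCE A (Python) =====
-- def _identify_player_type(button_text, button_id, player_url):
--     """Identifikasi tipe player berdasarkan text, id, atau URL"""
--     button_text_upper = button_text.upper()
--     player_url_lower = player_url.lower()
--
--     # **URUTAN PRIORITAS:**
--
--     # 1. CAST (Google Cast / Chromecast)
--     if any(keyword in button_text_upper for keyword in ['CAST', 'CHROME', 'CHROMECAST', 'GOOGLE']):
--         return ('cast', 'CAST Player')
--
--     # 2. TURBO (Turbovip)
--     elif any(keyword in button_text_upper for keyword in ['TURBO', 'TURBOVIP', 'TURBO VIP']):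
--         return ('turbovip', 'TURBOVIP')
--     elif 'turbovip' in player_url_lower:
--         return ('turbovip', 'TURBOVIP')
--
--     # 3. HYDRAX
--     elif 'HYDRAX' in button_text_upper:
--         return ('hydrax', 'HYDRAX')
--     elif 'hydrax' in player_url_lower:
--         return ('hydrax', 'HYDRAX')
--
--     # 4. P2P (jika masih ada)
--     elif 'P2P' in button_text_upper or 'p2p' in player_url_lower:
--         return ('p2p', 'P2P Player')
--
--     # 5. Default based on button text
--     elif button_text_upper:
--         # Coba tebak dari text
--         for keyword, player_type in [('CAST', 'cast'), ('TURBO', 'turbovip'), ('HYDRAX', 'hydrax')]: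
--             if keyword in button_text_upper:
--                 return (player_type, f"{keyword} Player")
--
--     return None
-- ===== SOURCE B (Python) =====
-- # Full-scan classifier: collect the priority of every matching check, then take
-- # the minimum priority.  Redundant keywords (CHROMECAST, TURBOVIP, TURBO VIP)
-- # are dropped since they contain CHROME/TURBO as substrings.
-- _CHECKS = [
--     (0, 'CAST', True), (0, 'CHROME', True), (0, 'GOOGLE', True),
--     (1, 'TURBO', True), (1, 'turbovip', False),
--     (2, 'HYDRAX', True), (2, 'hydrax', False),
--     (3, 'P2P', True), (3, 'p2p', False),
-- ]
-- _RESULTS = [('cast', 'CAST Player'), ('turbovip', 'TURBOVIP'),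
--             ('hydrax', 'HYDRAX'), ('p2p', 'P2P Player')]
--
--
-- def _identify_player_type(button_text, button_id, player_url):
--     tu = button_text.upper()
--     ul = player_url.lower()
--     matched = [p for p, kw, in_text in _CHECKS
--                if kw in (tu if in_text else ul)]
--     if matched:
--         return _RESULTS[min(matched)]
--     return None
-- ===== Notes on version B (the rewrite author's own statement) =====
-- stated objective: alternative
-- what changed: Replaces A's first-match if/elif chain (plus its provably-dead trailing guess loop) by a full scan that collects the priority of every matching keyword check and indexes a result table with the minimum priority; redundant keywords (CHROMECAST, TURBOVIP, TURBO VIP) are dropped since they contain CHROME/TURBO as substrings.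
import Mathlib
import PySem

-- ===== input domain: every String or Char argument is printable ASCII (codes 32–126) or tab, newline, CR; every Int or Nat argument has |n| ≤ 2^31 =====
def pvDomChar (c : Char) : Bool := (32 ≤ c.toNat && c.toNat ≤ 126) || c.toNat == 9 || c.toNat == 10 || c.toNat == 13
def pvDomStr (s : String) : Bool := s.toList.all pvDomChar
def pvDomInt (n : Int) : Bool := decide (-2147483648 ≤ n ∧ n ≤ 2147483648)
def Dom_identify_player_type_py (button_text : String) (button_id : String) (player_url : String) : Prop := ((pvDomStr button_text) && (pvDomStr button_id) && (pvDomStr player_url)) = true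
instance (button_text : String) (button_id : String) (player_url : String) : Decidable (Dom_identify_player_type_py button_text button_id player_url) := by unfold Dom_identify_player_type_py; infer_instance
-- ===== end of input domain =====

-- B replaces A's first-match if/elif chain by a full scan collecting the priority of every
-- matching check and taking the minimum (simpler decomposition; same cost).

-- ===== PORT A =====
-- final Python loop 'for keyword, player_type in [...]': structural recursion over the same list
def pvGuessLoop (tu : String) : List (String × String) → Option (String × String)
  | [] => none
  | (kw, pt) :: rest =>
      if PySem.Str.isIn kw tu then some (pt, kw ++ " Player") else pvGuessLoop tu rest

def identify_player_type_py (button_text : String) (button_id : String) (player_url : String) : Option (String × String) :=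
  let tu := PySem.Str.upper button_text
  let ul := PySem.Str.lower player_url
  if ["CAST", "CHROME", "CHROMECAST", "GOOGLE"].any (fun k => PySem.Str.isIn k tu) then
    some ("cast", "CAST Player")
  else if ["TURBO", "TURBOVIP", "TURBO VIP"].any (fun k => PySem.Str.isIn k tu) then
    some ("turbovip", "TURBOVIP")
  else if PySem.Str.isIn "turbovip" ul then some ("turbovip", "TURBOVIP")
  else if PySem.Str.isIn "HYDRAX" tu then some ("hydrax", "HYDRAX")
  else if PySem.Str.isIn "hydrax" ul then some ("hydrax", "HYDRAX")
  else if PySem.Str.isIn "P2P" tu || PySem.Str.isIn "p2p" ul then some ("p2p", "P2P Player")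
  else if tu ≠ "" then
    pvGuessLoop tu [("CAST", "cast"), ("TURBO", "turbovip"), ("HYDRAX", "hydrax")]
  else none

-- ===== PORT B =====
def pvChecks : List (Nat × String × Bool) :=
  [ (0, "CAST", true), (0, "CHROME", true), (0, "GOOGLE", true),
    (1, "TURBO", true), (1, "turbovip", false),
    (2, "HYDRAX", true), (2, "hydrax", false),
    (3, "P2P", true), (3, "p2p", false) ]

def pvResults : List (String × String) :=
  [("cast", "CAST Player"), ("turbovip", "TURBOVIP"), ("hydrax", "HYDRAX"), ("p2p", "P2P Player")]

def identify_player_type_py_alt (button_text : String) (button_id : String) (player_url : String) : Option (String × String) :=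
  let tu := PySem.Str.upper button_text
  let ul := PySem.Str.lower player_url
  let matched := pvChecks.filterMap (fun c =>
      if PySem.Str.isIn c.2.1 (if c.2.2 then tu else ul) then some c.1 else none)
  match matched with
  | [] => none
  | m :: rest => PySem.List.pyGet? pvResults (Int.ofNat (rest.foldl min m))  -- min over nonempty list; index always 0..3, in range

-- ===== PRECONDITION & SPEC =====
def Spec_identify_player_type_py (button_text : String) (button_id : String) (player_url : String) (out : Option (String × String)) : Prop := out = identify_player_type_py_alt button_text button_id player_url
instance (button_text : String) (button_id : String) (player_url : String) (out : Option (String × String)) : Decidable (Spec_identify_player_type_py button_text button_id player_url out) := by unfold Spec_identify_player_type_py; infer_instance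

-- ===== CLAIM (what is proved, stated in full; the proofs are below) =====
def Claim_equal_identify_player_type_py : Prop := ∀ (button_text : String) (button_id : String) (player_url : String), Dom_identify_player_type_py button_text button_id player_url → Spec_identify_player_type_py button_text button_id player_url (identify_player_type_py button_text button_id player_url)

-- ===== LEMMAS AND PROOFS =====
theorem pvIsIn_of_infix (a b s : String) (h : a.toList <:+: b.toList)
    (hb : PySem.Str.isIn b s = true) : PySem.Str.isIn a s = true := by
  rw [PySem.Str.isIn_iff_infix] at hb ⊢
  exact h.trans hb

-- ===== VERDICT (by name: the statement is the Claim_ definition above) =====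
set_option maxHeartbeats 1000000 in
theorem identify_player_type_py_spec : Claim_equal_identify_player_type_py := by
  intro bt bid url _
  have hcc := pvIsIn_of_infix "CHROME" "CHROMECAST" (PySem.Str.upper bt) (by decide)
  have htv := pvIsIn_of_infix "TURBO" "TURBOVIP" (PySem.Str.upper bt) (by decide)
  have htv2 := pvIsIn_of_infix "TURBO" "TURBO VIP" (PySem.Str.upper bt) (by decide)
  unfold Spec_identify_player_type_py identify_player_type_py identify_player_type_py_alt pvChecks pvResults
  dsimp only
  simp only [List.any_cons, List.any_nil, Bool.or_false, List.filterMap_cons, List.filterMap_nil,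
    pvGuessLoop, eq_self_iff_true, if_true, Bool.false_eq_true, if_false]
  by_cases hne : PySem.Str.upper bt = ""
  · rw [if_neg (show ¬ (PySem.Str.upper bt ≠ "") from not_not_intro hne)]
    revert hcc htv htv2
    generalize PySem.Str.isIn "CAST" (PySem.Str.upper bt) = b1
    generalize PySem.Str.isIn "CHROME" (PySem.Str.upper bt) = b2
    generalize PySem.Str.isIn "CHROMECAST" (PySem.Str.upper bt) = bcc
    generalize PySem.Str.isIn "GOOGLE" (PySem.Str.upper bt) = b3
    generalize PySem.Str.isIn "TURBO" (PySem.Str.upper bt) = b4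
    generalize PySem.Str.isIn "TURBOVIP" (PySem.Str.upper bt) = btv
    generalize PySem.Str.isIn "TURBO VIP" (PySem.Str.upper bt) = btv2
    generalize PySem.Str.isIn "turbovip" (PySem.Str.lower url) = b5
    generalize PySem.Str.isIn "HYDRAX" (PySem.Str.upper bt) = b6
    generalize PySem.Str.isIn "hydrax" (PySem.Str.lower url) = b7
    generalize PySem.Str.isIn "P2P" (PySem.Str.upper bt) = b8
    generalize PySem.Str.isIn "p2p" (PySem.Str.lower url) = b9
    revert b1 b2 bcc b3 b4 btv btv2 b5 b6 b7 b8 b9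
    decide
  · rw [if_pos (show PySem.Str.upper bt ≠ "" from hne)]
    revert hcc htv htv2
    generalize PySem.Str.isIn "CAST" (PySem.Str.upper bt) = b1
    generalize PySem.Str.isIn "CHROME" (PySem.Str.upper bt) = b2
    generalize PySem.Str.isIn "CHROMECAST" (PySem.Str.upper bt) = bcc
    generalize PySem.Str.isIn "GOOGLE" (PySem.Str.upper bt) = b3
    generalize PySem.Str.isIn "TURBO" (PySem.Str.upper bt) = b4
    generalize PySem.Str.isIn "TURBOVIP" (PySem.Str.upper bt) = btv
    generalize PySem.Str.isIn "TURBO VIP" (PySem.Str.upper bt) = btv2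
    generalize PySem.Str.isIn "turbovip" (PySem.Str.lower url) = b5
    generalize PySem.Str.isIn "HYDRAX" (PySem.Str.upper bt) = b6
    generalize PySem.Str.isIn "hydrax" (PySem.Str.lower url) = b7
    generalize PySem.Str.isIn "P2P" (PySem.Str.upper bt) = b8
    generalize PySem.Str.isIn "p2p" (PySem.Str.lower url) = b9
    revert b1 b2 bcc b3 b4 btv btv2 b5 b6 b7 b8 b9
    decide
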